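-- pv_equiv track=rewrite | github.com/williamdarkocode/AlgortithmsAndDataStructures | Python_Algos_Datastructstures/netflixcodesignal.py | queriesSolution
-- ===== SOURCE A (Python) =====
-- def ahandle(a:list,q:list):
--     a[q[1]]+=q[2]
--     return
--
-- def bhandle(a:list,b:list,qx:list):
--     aset = {}
--     for n in a:
--         if n not in aset:
--             aset[n] = 0
--         aset[n]+=1
--
--     bset = {}
--     for n in b:
--         if n not in bset:
--             bset[n] = 0
--         bset[n]+=1
--
--
--     pairs = set()
--     count = 0
--
--     if len(b) > len(a):
--         for i, n in enumerate(b):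
--             if (qx-n) in aset:
--                 count+=aset[(qx-n)]
--         return count
--     else:
--         for i, n in enumerate(a):
--             if (qx-n) in bset:
--                 count+=bset[(qx-n)]
--         return count
--
-- def queriesSolution(a:list, b:list, queries:list):
--     bres = []
--     for q in queries:
--         if q[0] == 0:
--             ahandle(a, q)
--         else:
--             bres.append(bhandle(a, b, q[1]))
--     return bres
-- ===== SOURCE B (Python) =====
-- def queriesSolution(a: list, b: list, queries: list):
--     # Mutates `a` in place like the original (a[q[1]] += q[2] on type-0 queries).
--     bcnt = {}
--     for n in b:
--         bcnt[n] = bcnt.get(n, 0) + 1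
--     bres = []
--     for q in queries:
--         if q[0] == 0:
--             a[q[1]] += q[2]
--         else:
--             x = q[1]
--             total = 0
--             for n in a:
--                 total += bcnt.get(x - n, 0)
--             bres.append(total)
--     return bres
-- ===== Notes on version B (the rewrite author's own statement) =====
-- stated objective: faster
-- what changed: B builds one counter of b once before the query loop and answers each sum query by a single scan of a, instead of rebuilding counters of both a and b and branching on list lengths for every query.
import Mathlib
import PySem

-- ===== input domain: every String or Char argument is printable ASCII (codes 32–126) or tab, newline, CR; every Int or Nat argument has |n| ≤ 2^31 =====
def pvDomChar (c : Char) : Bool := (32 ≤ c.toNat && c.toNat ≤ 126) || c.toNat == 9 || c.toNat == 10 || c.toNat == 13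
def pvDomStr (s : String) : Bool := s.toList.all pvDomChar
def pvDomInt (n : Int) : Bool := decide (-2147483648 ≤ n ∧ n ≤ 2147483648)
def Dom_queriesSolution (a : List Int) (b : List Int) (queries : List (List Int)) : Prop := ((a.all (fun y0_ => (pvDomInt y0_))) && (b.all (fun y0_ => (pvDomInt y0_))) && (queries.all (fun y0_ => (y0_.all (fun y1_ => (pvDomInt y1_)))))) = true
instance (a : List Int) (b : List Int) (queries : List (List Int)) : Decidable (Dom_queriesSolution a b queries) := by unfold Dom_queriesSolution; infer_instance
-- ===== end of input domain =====

-- B builds the counter of b ONCE before the query loop and answers each sum query by a single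
-- scan of a, instead of rebuilding counters of both a and b (and branching on list lengths)
-- for every query.  Both Pythons mutate `a` in place the same way; the theorems are about the
-- return value.

-- ===== PORT A =====
-- a[q[1]] += q[2]
def ahandlePort (a : List Int) (q : List Int) : List Int :=
  PySem.List.pySetD a (PySem.List.pyGetD q 1 0)
    (PySem.List.pyGetD a (PySem.List.pyGetD q 1 0) 0 + PySem.List.pyGetD q 2 0)

-- bhandle: build both counters, branch on which list is longer
def bhandlePort (a : List Int) (b : List Int) (qx : Int) : Int :=
  let aset := a.foldl (fun d n =>
      let d' := if d.contains n then d else d.insert n 0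
      d'.insert n (d'.getD n 0 + 1)) PySem.Dict.empty
  let bset := b.foldl (fun d n =>
      let d' := if d.contains n then d else d.insert n 0
      d'.insert n (d'.getD n 0 + 1)) PySem.Dict.empty
  if PySem.List.len b > PySem.List.len a then
    (PySem.List.enumerate b 0).foldl
      (fun c p => if aset.contains (qx - p.2) then c + aset.getD (qx - p.2) 0 else c) 0
  else
    (PySem.List.enumerate a 0).foldl
      (fun c p => if bset.contains (qx - p.2) then c + bset.getD (qx - p.2) 0 else c) 0

def qstepA (b : List Int) (st : List Int × List Int) (q : List Int) : List Int × List Int :=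
  if PySem.List.pyGetD q 0 0 = 0 then (ahandlePort st.1 q, st.2)
  else (st.1, st.2 ++ [bhandlePort st.1 b (PySem.List.pyGetD q 1 0)])

def queriesSolution (a : List Int) (b : List Int) (queries : List (List Int)) : List Int :=
  (queries.foldl (qstepA b) (a, ([] : List Int))).2

-- ===== PORT B =====
def qstepB (bcnt : PySem.Dict Int Int) (st : List Int × List Int) (q : List Int) : List Int × List Int :=
  if PySem.List.pyGetD q 0 0 = 0 then
    (PySem.List.pySetD st.1 (PySem.List.pyGetD q 1 0)
       (PySem.List.pyGetD st.1 (PySem.List.pyGetD q 1 0) 0 + PySem.List.pyGetD q 2 0), st.2)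
  else
    (st.1, st.2 ++ [st.1.foldl (fun t n => t + bcnt.getD (PySem.List.pyGetD q 1 0 - n) 0) 0])

def queriesSolution_alt (a : List Int) (b : List Int) (queries : List (List Int)) : List Int :=
  let bcnt := b.foldl (fun d n => d.insert n (d.getD n 0 + 1)) PySem.Dict.empty
  (queries.foldl (qstepB bcnt) (a, ([] : List Int))).2

-- ===== PRECONDITION & SPEC =====
-- Pre_ excludes exactly the inputs on which the Python A raises: a query shorter than its
-- form needs (IndexError on q[0]/q[1]/q[2]) or a type-0 query whose index is out of range.
def Pre_queriesSolution (a : List Int) (b : List Int) (queries : List (List Int)) : Prop :=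
  ∀ q ∈ queries,
    if q.getD 0 0 = 0 then
      3 ≤ q.length ∧ -(a.length : Int) ≤ q.getD 1 0 ∧ (q.getD 1 0 : Int) < a.length
    else 2 ≤ q.length
instance (a : List Int) (b : List Int) (queries : List (List Int)) : Decidable (Pre_queriesSolution a b queries) := by unfold Pre_queriesSolution; infer_instance

def pvWitness_queriesSolution : List Int × List Int × List (List Int) :=
  ([1, 2], [3, 1], [[0, 0, 1], [1, 4], [0, -1, 2], [1, 5]])

def Spec_queriesSolution (a : List Int) (b : List Int) (queries : List (List Int)) (out : List Int) : Prop := out = queriesSolution_alt a b queries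
instance (a : List Int) (b : List Int) (queries : List (List Int)) (out : List Int) : Decidable (Spec_queriesSolution a b queries out) := by unfold Spec_queriesSolution; infer_instance

-- ===== CLAIM (what is proved, stated in full; the proofs are below) =====
def Claim_equal_queriesSolution : Prop := ∀ (a : List Int) (b : List Int) (queries : List (List Int)), Dom_queriesSolution a b queries → Pre_queriesSolution a b queries → Spec_queriesSolution a b queries (queriesSolution a b queries)

-- ===== LEMMAS AND PROOFS =====

-- A's "if n not in d: d[n] = 0; d[n] += 1" step is the standard counting step.
theorem astep_eq_counter_step (d : PySem.Dict Int Int) (n : Int) :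
    (let d' := if d.contains n then d else d.insert n 0
     d'.insert n (d'.getD n 0 + 1)) = d.insert n (d.getD n 0 + 1) := by
  by_cases h : d.contains n = true
  · simp [h]
  · simp only [Bool.not_eq_true] at h
    simp [h, PySem.Dict.getD_insert_self, PySem.Dict.insert_insert_self,
      PySem.Dict.getD_of_not_contains d 0 h]

theorem aset_eq_counter (l : List Int) :
    (l.foldl (fun d n =>
      let d' := if d.contains n then d else d.insert n 0
      d'.insert n (d'.getD n 0 + 1)) PySem.Dict.empty) = PySem.Dict.counter l := by
  rw [show (fun (d : PySem.Dict Int Int) (n : Int) =>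
      let d' := if d.contains n then d else d.insert n 0
      d'.insert n (d'.getD n 0 + 1)) = fun d n => d.insert n (d.getD n 0 + 1) from
    funext fun d => funext fun n => astep_eq_counter_step d n]
  exact PySem.Dict.foldl_insert_getD_add_one_eq_counter l

-- one counted-lookup pass = a sum of counts
theorem fold_counter_sum (l xs : List Int) (x : Int) :
    l.foldl (fun c n => if (PySem.Dict.counter xs).contains (x - n) then
        c + (PySem.Dict.counter xs).getD (x - n) 0 else c) 0
      = (l.map (fun n => ((xs.count (x - n) : Nat) : Int))).sum := by
  have hf : (fun (c : Int) (n : Int) => if (PySem.Dict.counter xs).contains (x - n) then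
        c + (PySem.Dict.counter xs).getD (x - n) 0 else c)
      = fun c n => c + ((xs.count (x - n) : Nat) : Int) := by
    funext c n
    by_cases h : (PySem.Dict.counter xs).contains (x - n) = true
    · simp [h, PySem.Dict.getD_counter]
    · simp only [Bool.not_eq_true] at h
      have h0 : ((xs.count (x - n) : Nat) : Int) = 0 := by
        rw [← PySem.Dict.getD_counter xs (x - n)]
        exact PySem.Dict.getD_of_not_contains _ 0 h
      simp [h, h0]
  rw [hf, PySem.List.foldl_add]
  simp

theorem sum_indicator_count (l : List Int) (m x : Int) :
    (l.map (fun n => if x - n = m then (1 : Nat) else 0)).sum = l.count (x - m) := by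
  induction l with
  | nil => simp
  | cons y ys ih =>
    simp only [List.map_cons, List.sum_cons, List.count_cons, ih, beq_iff_eq]
    split_ifs with h1 h2 h3 <;> omega

-- double counting: pairs (i, j) with a_i + b_j = x, counted from either side
theorem count_swap (a b : List Int) (x : Int) :
    (b.map (fun n => a.count (x - n))).sum = (a.map (fun n => b.count (x - n))).sum := by
  induction a with
  | nil => simp
  | cons m a' ih =>
    have h1 : (b.map (fun n => (m :: a').count (x - n))).sum
        = (b.map (fun n => a'.count (x - n))).sum
          + (b.map (fun n => if x - n = m then (1 : Nat) else 0)).sum := by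
      rw [← List.sum_map_add]
      refine congrArg List.sum (List.map_congr_left fun n _ => ?_)
      simp only [List.count_cons, beq_iff_eq]
      split_ifs with h1 h2 h3 <;> omega
    rw [h1, sum_indicator_count, ih, List.map_cons, List.sum_cons]
    omega

theorem bhandle_eq (a b : List Int) (x : Int) :
    bhandlePort a b x = a.foldl (fun t n => t + (PySem.Dict.counter b).getD (x - n) 0) 0 := by
  have hB : a.foldl (fun t n => t + (PySem.Dict.counter b).getD (x - n) 0) 0
      = (a.map (fun n => ((b.count (x - n) : Nat) : Int))).sum := by
    rw [show (fun (t : Int) (n : Int) => t + (PySem.Dict.counter b).getD (x - n) 0)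
        = fun t n => t + ((b.count (x - n) : Nat) : Int) from
      funext fun t => funext fun n => by rw [PySem.Dict.getD_counter]]
    rw [PySem.List.foldl_add]; simp
  unfold bhandlePort
  simp only [aset_eq_counter]
  by_cases h : PySem.List.len b > PySem.List.len a
  · -- iterate b, look up in counter a
    simp only [h]
    have he : (PySem.List.enumerate b 0).foldl
        (fun c p => if (PySem.Dict.counter a).contains (x - p.2) then
          c + (PySem.Dict.counter a).getD (x - p.2) 0 else c) 0
        = b.foldl (fun c n => if (PySem.Dict.counter a).contains (x - n) then
          c + (PySem.Dict.counter a).getD (x - n) 0 else c) 0 := by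
      rw [← PySem.List.map_snd_enumerate b 0, List.foldl_map,
        PySem.List.map_snd_enumerate b 0]
    rw [he, fold_counter_sum, hB]
    have := count_swap a b x
    calc (b.map (fun n => ((a.count (x - n) : Nat) : Int))).sum
        = (((b.map (fun n => a.count (x - n))).sum : Nat) : Int) := by
          rw [Nat.cast_list_sum, List.map_map]; rfl
      _ = (((a.map (fun n => b.count (x - n))).sum : Nat) : Int) := by rw [this]
      _ = (a.map (fun n => ((b.count (x - n) : Nat) : Int))).sum := by
          rw [Nat.cast_list_sum, List.map_map]; rfl
  · simp only [if_neg h]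
    have he : (PySem.List.enumerate a 0).foldl
        (fun c p => if (PySem.Dict.counter b).contains (x - p.2) then
          c + (PySem.Dict.counter b).getD (x - p.2) 0 else c) 0
        = a.foldl (fun c n => if (PySem.Dict.counter b).contains (x - n) then
          c + (PySem.Dict.counter b).getD (x - n) 0 else c) 0 := by
      rw [← PySem.List.map_snd_enumerate a 0, List.foldl_map,
        PySem.List.map_snd_enumerate a 0]
    rw [he, fold_counter_sum, hB]

theorem qstep_eq (b : List Int) (st : List Int × List Int) (q : List Int) :
    qstepA b st q = qstepB (PySem.Dict.counter b) st q := by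
  by_cases h : PySem.List.pyGetD q 0 0 = 0
  · simp [qstepA, qstepB, h, ahandlePort]
  · simp [qstepA, qstepB, h, bhandle_eq]

-- ===== VERDICT (by name: the statement is the Claim_ definition above) =====
theorem queriesSolution_spec : Claim_equal_queriesSolution := by
  intro a b queries _ _
  unfold Spec_queriesSolution queriesSolution queriesSolution_alt
  rw [show (List.foldl (fun d n => d.insert n (d.getD n 0 + 1)) PySem.Dict.empty b)
      = PySem.Dict.counter b from PySem.Dict.foldl_insert_getD_add_one_eq_counter b]
  rw [show qstepA b = qstepB (PySem.Dict.counter b) from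
    funext fun st => funext fun q => qstep_eq b st q]
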